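-- pv_equiv track=rewrite | github.com/LuqiPan/Life-is-a-Struggle | 8_Recursion_and_Dynamic_Programming/1_triple_steps/triple_steps.py | triple_steps
-- ===== SOURCE A (Python) =====
-- def triple_steps(n):
--     if n == 1:
--         return 1
--
--     if n == 2:
--         return 2
--
--     if n == 3:
--         return 4
--
--     a = 1
--     b = 2
--     c = 4
--     for i in range(4, n + 1):
--         d = a + b + c
--         a = b
--         b = c
--         c = d
--
--     return d
-- ===== SOURCE B (Python) =====
-- _M = ((1, 1, 1), (1, 0, 0), (0, 1, 0))
-- _I = ((1, 0, 0), (0, 1, 0), (0, 0, 1))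
--
--
-- def _mat_mul(x, y):
--     return tuple(
--         tuple(sum(x[i][k] * y[k][j] for k in range(3)) for j in range(3))
--         for i in range(3)
--     )
--
--
-- def _mat_pow(k):
--     if k == 0:
--         return _I
--     if k % 2 == 0:
--         h = _mat_pow(k // 2)
--         return _mat_mul(h, h)
--     return _mat_mul(_M, _mat_pow(k - 1))
--
--
-- def triple_steps(n):
--     if n < 4:
--         return (1, 2, 4)[n - 1]
--     p = _mat_pow(n - 3)
--     return 4 * p[0][0] + 2 * p[0][1] + p[0][2]
-- ===== Notes on version B (the rewrite author's own statement) =====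
-- stated objective: faster
-- what changed: Replaced A's linear dynamic-programming loop over 4..n by 3x3 matrix exponentiation by squaring of the tribonacci recurrence.
import Mathlib
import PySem

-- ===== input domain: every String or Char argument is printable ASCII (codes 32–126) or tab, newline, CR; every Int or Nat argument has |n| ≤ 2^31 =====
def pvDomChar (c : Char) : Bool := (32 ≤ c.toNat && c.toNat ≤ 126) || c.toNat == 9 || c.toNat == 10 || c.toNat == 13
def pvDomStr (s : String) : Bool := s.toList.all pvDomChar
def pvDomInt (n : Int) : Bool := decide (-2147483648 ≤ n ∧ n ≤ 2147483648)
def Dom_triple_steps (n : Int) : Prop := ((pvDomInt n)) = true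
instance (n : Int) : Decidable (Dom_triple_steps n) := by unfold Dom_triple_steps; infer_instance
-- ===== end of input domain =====

-- B replaces A's O(n) linear recurrence loop by O(log n) 3x3 matrix exponentiation by squaring (asymptotically faster).

-- ===== PORT A =====
-- the loop body: d = a+b+c; a,b,c = b,c,d; state is (a,b,c,d), d initialised to a dummy 0
-- (Python leaves d unbound; for n ≥ 4 the loop runs at least once, n ≤ 0 raises and is outside Pre_)
def tsStep (st : Int × Int × Int × Int) : Int × Int × Int × Int :=
  let d := st.1 + st.2.1 + st.2.2.1
  (st.2.1, st.2.2.1, d, d)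

def triple_steps (n : Int) : Int :=
  if n == 1 then 1
  else if n == 2 then 2
  else if n == 3 then 4
  else
    let st := (PySem.List.pyRange 4 (n + 1) 1).foldl (fun s _ => tsStep s) (1, 2, 4, 0)
    st.2.2.2

-- ===== PORT B =====
-- 3x3 integer matrix, row-major
structure M3 where
  (a11 a12 a13 a21 a22 a23 a31 a32 a33 : Int)
deriving DecidableEq, Repr

def m3I : M3 := ⟨1,0,0, 0,1,0, 0,0,1⟩
def m3M : M3 := ⟨1,1,1, 1,0,0, 0,1,0⟩

def m3mul (x y : M3) : M3 :=
  ⟨x.a11*y.a11 + x.a12*y.a21 + x.a13*y.a31,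
   x.a11*y.a12 + x.a12*y.a22 + x.a13*y.a32,
   x.a11*y.a13 + x.a12*y.a23 + x.a13*y.a33,
   x.a21*y.a11 + x.a22*y.a21 + x.a23*y.a31,
   x.a21*y.a12 + x.a22*y.a22 + x.a23*y.a32,
   x.a21*y.a13 + x.a22*y.a23 + x.a23*y.a33,
   x.a31*y.a11 + x.a32*y.a21 + x.a33*y.a31,
   x.a31*y.a12 + x.a32*y.a22 + x.a33*y.a32,
   x.a31*y.a13 + x.a32*y.a23 + x.a33*y.a33⟩

-- binary exponentiation, exactly Source B's _mat_pow
def matPow : Nat → M3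
  | 0 => m3I
  | (k+1) =>
      if (k+1) % 2 == 0 then
        let h := matPow ((k+1) / 2)
        m3mul h h
      else
        m3mul m3M (matPow k)
termination_by k => k
decreasing_by
  · omega
  · omega

def triple_steps_alt (n : Int) : Int :=
  if n < 4 then
    (PySem.List.pyGet? ([1, 2, 4] : List Int) (n - 1)).getD 0
  else
    let p := matPow (n - 3).toNat
    4 * p.a11 + 2 * p.a12 + p.a13

-- ===== PRECONDITION & SPEC =====
-- Pre_ excludes n ≤ 0, on which Python A raises UnboundLocalError (the loop never runs and d is unbound)
def Pre_triple_steps (n : Int) : Prop := 1 ≤ n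
instance (n : Int) : Decidable (Pre_triple_steps n) := by unfold Pre_triple_steps; infer_instance
def pvWitness_triple_steps : Int := 5

def Spec_triple_steps (n : Int) (out : Int) : Prop := out = triple_steps_alt n
instance (n : Int) (out : Int) : Decidable (Spec_triple_steps n out) := by unfold Spec_triple_steps; infer_instance

-- ===== CLAIM (what is proved, stated in full; the proofs are below) =====
def Claim_equal_triple_steps : Prop := ∀ (n : Int), Dom_triple_steps n → Pre_triple_steps n → Spec_triple_steps n (triple_steps n)

-- ===== LEMMAS AND PROOFS =====

-- the common mathematical spec: g k = number of ways to climb k+1 steps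
def g : Nat → Int
  | 0 => 1
  | 1 => 2
  | 2 => 4
  | (k+3) => g (k+2) + g (k+1) + g k

-- iterated (non-binary) matrix power, the induction ladder for matPow
def mIter : Nat → M3
  | 0 => m3I
  | (k+1) => m3mul m3M (mIter k)

theorem m3mul_one (x : M3) : m3mul m3I x = x := by
  cases x; simp [m3mul, m3I]

theorem m3mul_assoc (x y z : M3) : m3mul (m3mul x y) z = m3mul x (m3mul y z) := by
  cases x; cases y; cases z
  simp only [m3mul, M3.mk.injEq]
  refine ⟨?_, ?_, ?_, ?_, ?_, ?_, ?_, ?_, ?_⟩ <;> ring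

theorem mIter_add (a b : Nat) : mIter (a + b) = m3mul (mIter a) (mIter b) := by
  induction a with
  | zero => simp [mIter, m3mul_one]
  | succ a ih =>
      have : a + 1 + b = (a + b) + 1 := by omega
      rw [this]
      simp [mIter, ih, m3mul_assoc]

theorem matPow_eq_mIter : ∀ k : Nat, matPow k = mIter k := by
  intro k
  induction k using Nat.strong_induction_on with
  | _ k ih =>
    match k with
    | 0 => rw [matPow]; rfl
    | (k+1) =>
      rw [matPow]
      by_cases h : (k+1) % 2 = 0
      · have h2 : (k+1)/2 < k+1 := Nat.div_lt_self (by omega) (by omega)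
        simp only [h, beq_self_eq_true, if_true]
        rw [ih _ h2, ← mIter_add]
        congr 1
        omega
      · have hb : ((k+1) % 2 == 0) = false := by simpa using h
        simp only [hb, Bool.false_eq_true, if_false]
        rw [ih k (by omega)]
        rfl

-- first/second/third rows of mIter k, dotted with the seed column (4,2,1)
theorem mIter_rows (k : Nat) :
    4 * (mIter k).a11 + 2 * (mIter k).a12 + (mIter k).a13 = g (k+2) ∧
    4 * (mIter k).a21 + 2 * (mIter k).a22 + (mIter k).a23 = g (k+1) ∧
    4 * (mIter k).a31 + 2 * (mIter k).a32 + (mIter k).a33 = g k := by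
  induction k with
  | zero => refine ⟨?_, ?_, ?_⟩ <;> simp [mIter, m3I, g]
  | succ k ih =>
      obtain ⟨h1, h2, h3⟩ := ih
      have hg : g (k+3) = g (k+2) + g (k+1) + g k := by rw [g]
      have e1 : k + 1 + 2 = k + 3 := rfl
      have e2 : k + 1 + 1 = k + 2 := rfl
      refine ⟨?_, ?_, ?_⟩ <;>
        simp only [mIter, m3mul, m3M, e1, e2] <;> linarith

-- A's loop: the fold ignores the elements, so it is iteration of tsStep
theorem foldl_tsStep (l : List Int) (init : Int × Int × Int × Int) :
    l.foldl (fun s _ => tsStep s) init = tsStep^[l.length] init := by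
  induction l generalizing init with
  | nil => rfl
  | cons x xs ih => simp [List.foldl, ih, Function.iterate_succ_apply]

theorem iterate_tsStep (j : Nat) :
    tsStep^[j + 1] (1, 2, 4, 0) = (g (j+1), g (j+2), g (j+3), g (j+3)) := by
  induction j with
  | zero => decide
  | succ j ih =>
      rw [Function.iterate_succ_apply', ih]
      have hg : g (j+4) = g (j+3) + g (j+2) + g (j+1) := by rw [show j+4 = (j+1)+3 from rfl, g]
      have e1 : j + 1 + 1 = j + 2 := rfl
      have e2 : j + 1 + 2 = j + 3 := rfl
      have e3 : j + 1 + 3 = j + 4 := rfl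
      simp only [tsStep, e1, e2, e3, Prod.mk.injEq]
      refine ⟨trivial, trivial, ?_, ?_⟩ <;> rw [hg] <;> ring

theorem triple_steps_eq_g (n : Int) (h : 1 ≤ n) : triple_steps n = g (n.toNat - 1) := by
  unfold triple_steps
  by_cases h4 : n < 4
  · interval_cases n <;> decide
  · rw [not_lt] at h4
    have h1 : (n == 1) = false := by simp; omega
    have h2 : (n == 2) = false := by simp; omega
    have h3 : (n == 3) = false := by simp; omega
    simp only [h1, h2, h3, Bool.false_eq_true, if_false]
    rw [foldl_tsStep, PySem.List.length_pyRange_one]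
    have hlen : (n + 1 - 4).toNat = (n.toNat - 4) + 1 := by omega
    rw [hlen, iterate_tsStep]
    have : n.toNat - 4 + 3 = n.toNat - 1 := by omega
    rw [this]

theorem triple_steps_alt_eq_g (n : Int) (h : 1 ≤ n) : triple_steps_alt n = g (n.toNat - 1) := by
  unfold triple_steps_alt
  by_cases h4 : n < 4
  · interval_cases n <;> decide
  · rw [not_lt] at h4
    simp only [if_neg (by omega : ¬ n < 4)]
    rw [matPow_eq_mIter]
    have := (mIter_rows (n - 3).toNat).1
    rw [this]
    congr 1
    omega

-- ===== VERDICT (by name: the statement is the Claim_ definition above) =====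
theorem triple_steps_spec : Claim_equal_triple_steps := by
  intro n _ hpre
  unfold Spec_triple_steps
  rw [triple_steps_eq_g n hpre, triple_steps_alt_eq_g n hpre]
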